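-- pv_equiv track=rewrite | github.com/seho27060/oct-algo-study | 1019/1019_yuzu.py | solution
-- ===== SOURCE A (Python) =====
-- from collections import deque
--
-- def solution(queue1, queue2):
--     queue1 = deque(queue1)
--     queue2 = deque(queue2)
--     n = len(queue1)
--     s1 = sum(queue1)
--     s2 = sum(queue2)
--     sumV = s1 + s2
--     sumV //= 2
--     answer = 0
--     while s1 != (sumV):
--         if not queue1 or not queue2:
--             return -1
--         if answer > (2*n)+1:
--             return -1
--         if s2 > s1:
--             y = queue2.popleft()
--             s2 -= y
--             s1 += y
--             queue1.append(y)
--         else: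
--             x = queue1.popleft()
--             s1 -= x
--             s2 += x
--             queue2.append(x)
--         answer += 1
--
--     return answer
-- ===== SOURCE B (Python) =====
-- def solution(queue1, queue2):
--     arr = list(queue1) + list(queue2)
--     L = len(arr)
--     n = len(queue1)
--     s1 = sum(queue1)
--     total = s1 + sum(queue2)
--     target = total // 2
--     left, right = 0, n
--     count = 0
--     while s1 != target:
--         w = right - left
--         if w == 0 or w == L or count > 2 * n + 1:
--             return -1
--         if total - s1 > s1:
--             s1 += arr[right % L]
--             right += 1
--         else:
--             s1 -= arr[left % L]
--             left += 1
--         count += 1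
--     return count
-- ===== Notes on version B (the rewrite author's own statement) =====
-- stated objective: alternative
-- what changed: Replaces A's two mutating deques (popleft/append rotation) by a single static concatenated array with two monotonically advancing index pointers (left, right) and a running sum, testing queue emptiness via the window size right-left being 0 or L.
import Mathlib
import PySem

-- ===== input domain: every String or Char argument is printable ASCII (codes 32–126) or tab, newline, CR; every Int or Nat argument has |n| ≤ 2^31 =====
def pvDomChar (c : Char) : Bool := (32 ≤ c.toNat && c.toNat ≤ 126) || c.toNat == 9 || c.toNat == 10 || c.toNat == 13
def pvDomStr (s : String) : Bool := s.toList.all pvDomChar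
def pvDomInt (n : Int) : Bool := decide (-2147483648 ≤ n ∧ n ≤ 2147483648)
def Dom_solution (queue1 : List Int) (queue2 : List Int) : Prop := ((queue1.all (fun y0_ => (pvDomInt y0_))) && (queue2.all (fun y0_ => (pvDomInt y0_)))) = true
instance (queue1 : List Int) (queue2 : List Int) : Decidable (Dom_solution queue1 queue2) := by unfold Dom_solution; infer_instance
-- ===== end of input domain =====

-- B replaces A's physical deque rotation by a static array with two advancing index
-- pointers (same asymptotic cost, no list mutation); objective: alternative.

-- ===== PORT A =====
-- A's while loop; the answer counter increases by 1 each pass and the loop returns -1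
-- once answer > 2*n+1, so at most 2*n+3 passes ever run: fuel 2*len(queue1)+4 is never
-- exhausted and the fuel-out branch (-1) is unreachable.
def solutionLoopA (n sumV : Int) : Nat → List Int → List Int → Int → Int → Int → Int
  | 0, _, _, _, _, _ => -1
  | fuel+1, q1, q2, s1, s2, answer =>
    if s1 = sumV then answer
    else if q1 = [] ∨ q2 = [] then -1
    else if answer > 2*n+1 then -1
    else if s2 > s1 then
      match q2 with
      | y :: q2' => solutionLoopA n sumV fuel (q1 ++ [y]) q2' (s1+y) (s2-y) (answer+1)
      | [] => -1
    else
      match q1 with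
      | x :: q1' => solutionLoopA n sumV fuel q1' (q2 ++ [x]) (s1-x) (s2+x) (answer+1)
      | [] => -1

def solution (queue1 : List Int) (queue2 : List Int) : Int :=
  let n : Int := queue1.length
  let s1 := queue1.sum
  let s2 := queue2.sum
  let sumV := PySem.Int.floordiv (s1 + s2) 2
  solutionLoopA n sumV (2*queue1.length+4) queue1 queue2 s1 s2 0

-- ===== PORT B =====
-- B's while loop with the same fuel bound (count mirrors answer, so ≤ 2*n+3 passes).
-- arr[right % L] / arr[left % L]: the index is a Python mod in [0,L), always in range,
-- so pyGetD with default 0 is exact here.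
def solutionLoopB (arr : List Int) (L n total target : Int) :
    Nat → Int → Int → Int → Int → Int
  | 0, _, _, _, _ => -1
  | fuel+1, s1, left, right, count =>
    if s1 = target then count
    else if right - left = 0 ∨ right - left = L ∨ count > 2*n+1 then -1
    else if total - s1 > s1 then
      solutionLoopB arr L n total target fuel
        (s1 + PySem.List.pyGetD arr (PySem.Int.mod right L) 0) left (right+1) (count+1)
    else
      solutionLoopB arr L n total target fuel
        (s1 - PySem.List.pyGetD arr (PySem.Int.mod left L) 0) (left+1) right (count+1)

def solution_alt (queue1 : List Int) (queue2 : List Int) : Int :=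
  let arr := queue1 ++ queue2
  let L : Int := arr.length
  let n : Int := queue1.length
  let s1 := queue1.sum
  let total := s1 + queue2.sum
  let target := PySem.Int.floordiv total 2
  solutionLoopB arr L n total target (2*queue1.length+4) s1 0 (n : Int) 0

-- ===== PRECONDITION & SPEC =====
def Spec_solution (queue1 : List Int) (queue2 : List Int) (out : Int) : Prop := out = solution_alt queue1 queue2
instance (queue1 : List Int) (queue2 : List Int) (out : Int) : Decidable (Spec_solution queue1 queue2 out) := by unfold Spec_solution; infer_instance

-- ===== CLAIM (what is proved, stated in full; the proofs are below) =====
def Claim_equal_solution : Prop := ∀ (queue1 : List Int) (queue2 : List Int), Dom_solution queue1 queue2 → Spec_solution queue1 queue2 (solution queue1 queue2)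

-- ===== LEMMAS AND PROOFS =====

-- Loop correspondence: A's two deques are exactly the window [l, r) of the rotated
-- static array, and B's running s1 together with the fixed total reproduces A's s2.
lemma loop_eq (arr : List Int) (n total target : Int) :
    ∀ (fuel : Nat) (l r : Nat) (q1 q2 : List Int) (s1 answer : Int),
      l ≤ r →
      q1 ++ q2 = arr.rotate l →
      q1.length = r - l →
      solutionLoopA n target fuel q1 q2 s1 (total - s1) answer =
        solutionLoopB arr (arr.length : Int) n total target fuel s1 (l : Int) (r : Int) answer := by
  intro fuel
  induction fuel with
  | zero => intro _ _ _ _ _ _ _ _ _; rfl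
  | succ fuel ih =>
    intro l r q1 q2 s1 answer hlr hrot hlen
    have hLrot : q1.length + q2.length = arr.length := by
      have := congrArg List.length hrot
      simpa [List.length_rotate] using this
    have hwin : ((r : Int) - (l : Int)) = ((r - l : Nat) : Int) := by omega
    have hq1e : (q1 = []) ↔ ((r : Int) - (l : Int) = 0) := by
      constructor
      · intro h; subst h; simp at hlen; omega
      · intro h
        have : q1.length = 0 := by omega
        exact List.eq_nil_of_length_eq_zero this
    have hq2e : (q2 = []) ↔ ((r : Int) - (l : Int) = (arr.length : Int)) := by
      constructor
      · intro h; subst h; simp at hLrot; omega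
      · intro h
        have : q2.length = 0 := by omega
        exact List.eq_nil_of_length_eq_zero this
    rw [show (fuel+1) = fuel.succ from rfl, solutionLoopA.eq_def, solutionLoopB.eq_def]
    by_cases hs : s1 = target
    · simp [hs]
    · simp only [if_neg hs]
      by_cases hemp : q1 = [] ∨ q2 = []
      · rw [if_pos hemp, if_pos]
        rcases hemp with h | h
        · exact Or.inl (hq1e.mp h)
        · exact Or.inr (Or.inl (hq2e.mp h))
      · have h1ne : q1 ≠ [] := fun h => hemp (Or.inl h)
        have h2ne : q2 ≠ [] := fun h => hemp (Or.inr h)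
        rw [if_neg hemp]
        by_cases hans : answer > 2*n+1
        · rw [if_pos hans, if_pos (Or.inr (Or.inr hans))]
        · have hnd : ¬(((r:Int) - (l:Int) = 0) ∨ ((r:Int) - (l:Int) = (arr.length:Int)) ∨ answer > 2*n+1) := by
            simp only [not_or]
            exact ⟨fun h => h1ne (hq1e.mpr h), fun h => h2ne (hq2e.mpr h), hans⟩
          rw [if_neg hans, if_neg hnd]
          have harrne : arr ≠ [] := by
            intro h; subst h
            simp at hLrot
            exact h1ne hLrot.1
          have hLpos : 0 < arr.length := List.length_pos_iff.mpr harrne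
          have hq1pos : 0 < q1.length := List.length_pos_iff.mpr h1ne
          have hq2pos : 0 < q2.length := List.length_pos_iff.mpr h2ne
          by_cases hcmp : total - s1 > s1
          · -- move head of q2 to the tail of q1 (B: right pointer advances)
            simp only [if_pos hcmp]
            obtain ⟨y, q2', hq2⟩ := List.exists_cons_of_ne_nil h2ne
            subst hq2
            -- head of q2 is arr[r % L]
            have hrl : r - l < arr.length := by omega
            have hy : PySem.List.pyGetD arr (PySem.Int.mod (r : Int) (arr.length : Int)) 0 = y := by
              have hgq : (q1 ++ y :: q2')[r - l]? = some y := by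
                rw [List.getElem?_append_right (by omega)]
                simp [hlen]
              rw [hrot, List.getElem?_rotate hrl, Nat.sub_add_cancel hlr] at hgq
              rw [show ((r : Int)) = ((r : Nat) : Int) from rfl, PySem.Int.mod_natCast,
                PySem.List.pyGetD_natCast, List.getD_eq_getElem?_getD, hgq]
              rfl
            rw [hy]
            have step := ih l (r+1) (q1 ++ [y]) q2' (s1 + y) (answer + 1)
              (by omega)
              (by rw [← hrot]; simp)
              (by simp only [List.length_append, List.length_cons, List.length_nil, hlen]; omega)
            have heq : total - (s1 + y) = total - s1 - y := by ring
            rw [heq] at step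
            show solutionLoopA n target fuel (q1 ++ [y]) q2' (s1 + y) (total - s1 - y) (answer + 1) = _
            rw [step]
            push_cast
            ring_nf
          · -- move head of q1 to the tail of q2 (B: left pointer advances)
            simp only [if_neg hcmp]
            obtain ⟨x, q1', hq1⟩ := List.exists_cons_of_ne_nil h1ne
            subst hq1
            have hx : PySem.List.pyGetD arr (PySem.Int.mod (l : Int) (arr.length : Int)) 0 = x := by
              have hgq : ((x :: q1') ++ q2)[0]? = some x := by simp
              rw [hrot, List.getElem?_rotate hLpos, Nat.zero_add] at hgq
              rw [show ((l : Int)) = ((l : Nat) : Int) from rfl, PySem.Int.mod_natCast,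
                PySem.List.pyGetD_natCast, List.getD_eq_getElem?_getD, hgq]
              rfl
            rw [hx]
            have hrot' : q1' ++ (q2 ++ [x]) = arr.rotate (l+1) := by
              have : arr.rotate (l+1) = (arr.rotate l).rotate 1 := by
                rw [List.rotate_rotate]
              rw [this, ← hrot]
              simp [List.rotate_cons_succ]
            have step := ih (l+1) r q1' (q2 ++ [x]) (s1 - x) (answer + 1)
              (by simp only [List.length_cons] at hlen; omega)
              hrot'
              (by simp only [List.length_cons] at hlen; omega)
            have heq : total - (s1 - x) = total - s1 + x := by ring
            rw [heq] at step
            show solutionLoopA n target fuel q1' (q2 ++ [x]) (s1 - x) (total - s1 + x) (answer + 1) = _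
            rw [step]
            push_cast
            ring_nf

-- ===== VERDICT (by name: the statement is the Claim_ definition above) =====
theorem solution_spec : Claim_equal_solution := by
  intro queue1 queue2 _
  unfold Spec_solution solution solution_alt
  have h := loop_eq (queue1 ++ queue2) (queue1.length : Int)
      (queue1.sum + queue2.sum)
      (PySem.Int.floordiv (queue1.sum + queue2.sum) 2)
      (2*queue1.length+4) 0 queue1.length queue1 queue2 queue1.sum 0
      (by omega) (by simp) (by simp)
  simp only [Nat.cast_zero] at h
  simp only []
  rw [show queue1.sum + queue2.sum - queue1.sum = queue2.sum by ring] at h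
  simpa [List.length_append] using h
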